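-- pv_equiv track=rewrite | github.com/ShadowInsights/exchange-data-collector | app/utils/string_utils.py | add_comma_every_n_symbols
-- ===== SOURCE A (Python) =====
-- def add_comma_every_n_symbols(input_value, n=3) -> str:
--     # Ensure the input is a string
--     input_str = str(input_value).strip()
--
--     # Split into integer and decimal parts
--     if "." in input_str:
--         int_part, decimal_part = input_str.split(".")
--     else:
--         int_part, decimal_part = input_str, None
--
--     # Remove any non-digit characters (like spaces or negative signs) from the integer part
--     sign = ""
--     if int_part and (int_part[0] == "-" or int_part[0] == "+"):
--         sign = int_part[0]  # Save the sign
--         int_part = int_part[1:]  # Remove the sign from the integer part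
--
--     # Add commas
--     reversed_int_part = int_part[::-1]
--     commas_added = [
--         reversed_int_part[i : i + n]
--         for i in range(0, len(reversed_int_part), n)
--     ]
--     int_with_commas = sign + ",".join(commas_added)[::-1]
--
--     # Combine integer and decimal parts
--     if decimal_part is not None:
--         return f"{int_with_commas}.{decimal_part}"
--     else:
--         return int_with_commas
-- ===== SOURCE B (Python) =====
-- def add_comma_every_n_symbols(input_value, n=3) -> str:
--     # Single left-to-right pass: emit each integer-part character, inserting a
--     # comma before position j whenever the remaining digit count (end - j) is a
--     # multiple of n. No reversing, no chunk lists, no join.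
--     s = str(input_value).strip()
--     sign = ""
--     if s and s[0] in "+-":
--         sign, s = s[0], s[1:]
--     dot = s.find(".")
--     end = len(s) if dot == -1 else dot
--     out = sign
--     for j in range(end):
--         if j and (end - j) % n == 0:
--             out += ","
--         out += s[j]
--     return out + s[end:]
-- ===== Notes on version B (the rewrite author's own statement) =====
-- stated objective: simpler
-- what changed: B makes a single left-to-right pass over the integer part, inserting a comma before index j exactly when the remaining length (end - j) is a multiple of n, instead of A's reverse-the-string, chunk into slices, join, reverse-again pipeline over a split() list.
-- outside the precondition, e.g. on add_comma_every_n_symbols('12345', -3): A returns '', B returns '12,345'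
import Mathlib
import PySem

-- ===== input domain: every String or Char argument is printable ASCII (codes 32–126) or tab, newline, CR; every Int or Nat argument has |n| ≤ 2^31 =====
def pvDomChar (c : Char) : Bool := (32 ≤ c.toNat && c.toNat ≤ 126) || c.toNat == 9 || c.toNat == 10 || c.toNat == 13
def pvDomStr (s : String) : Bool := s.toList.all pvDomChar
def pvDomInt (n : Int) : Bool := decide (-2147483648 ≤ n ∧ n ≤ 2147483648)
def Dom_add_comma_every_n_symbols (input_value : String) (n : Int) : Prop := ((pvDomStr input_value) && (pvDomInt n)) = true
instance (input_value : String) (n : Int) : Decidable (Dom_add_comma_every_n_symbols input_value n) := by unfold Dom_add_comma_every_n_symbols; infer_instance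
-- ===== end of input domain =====

-- B makes one left-to-right pass, inserting a comma before index j when (end - j) is a
-- multiple of n, replacing A's reverse / chunk / join / reverse pipeline; objective: simpler.

-- ===== PORT A =====
def add_comma_every_n_symbols (input_value : String) (n : Int) : String :=
  -- input is already a str; str(input_value).strip()
  let input_str := PySem.Chars.strip input_value.toList
  -- if "." in input_str: int_part, decimal_part = input_str.split(".")  (ValueError on ≠ 2 pieces: outside Pre_)
  let pd : List Char × Option (List Char) :=
    if PySem.Chars.isIn ['.'] input_str then
      match PySem.Chars.splitOn input_str ['.'] with
      | [a, b] => (a, some b)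
      | _ => ([], none)   -- Python raises ValueError here (tuple unpacking); excluded by Pre_
    else (input_str, none)
  let int_part := pd.1
  let decimal_part := pd.2
  -- sign handling
  let sp : List Char × List Char :=
    match int_part with
    | c :: rest => if c = '-' ∨ c = '+' then ([c], rest) else ([], c :: rest)
    | [] => ([], [])
  let sign := sp.1
  let int_part := sp.2
  -- reversed_int_part = int_part[::-1]  (s[::-1] is reverse: PySem.List.slice?_none_none_neg_one)
  let reversed_int_part := int_part.reverse
  -- [reversed_int_part[i:i+n] for i in range(0, len(reversed_int_part), n)]  (n = 0 raises ValueError: outside Pre_)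
  let commas_added := (PySem.List.pyRange 0 (reversed_int_part.length : Int) n).map
    (fun i => PySem.List.slice reversed_int_part (some i) (some (i + n)))
  let int_with_commas := sign ++ (PySem.Chars.join [','] commas_added).reverse
  match decimal_part with
  | some d => String.ofList (int_with_commas ++ '.' :: d)
  | none => String.ofList int_with_commas

-- ===== PORT B =====
def add_comma_every_n_symbols_alt (input_value : String) (n : Int) : String :=
  let s0 := PySem.Chars.strip input_value.toList
  -- if s and s[0] in "+-": sign, s = s[0], s[1:]
  let sp : List Char × List Char :=
    match s0 with
    | c :: rest => if c ∈ ['+', '-'] then ([c], rest) else ([], c :: rest)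
    | [] => ([], [])
  let sign := sp.1
  let s := sp.2
  -- dot = s.find("."); end = len(s) if dot == -1 else dot
  let dot := PySem.Chars.find s ['.']
  let e : Int := if dot = -1 then (s.length : Int) else dot
  -- for j in range(end): if j and (end - j) % n == 0: out += ","
  --                      out += s[j]
  -- (range(end) has end ≥ 0 here; s[j] is always in range since j < end ≤ len(s),
  --  so List.getD is exact for it; n = 0 raises ZeroDivisionError: outside Pre_)
  let out := (List.range e.toNat).foldl
    (fun (out : List Char) (j : Nat) =>
      (if j ≠ 0 ∧ PySem.Int.mod (e - (j : Int)) n = 0 then out ++ [','] else out) ++ [s.getD j ' '])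
    sign
  -- return out + s[end:]
  String.ofList (out ++ PySem.List.slice s (some e) none)

-- ===== PRECONDITION & SPEC =====
-- Pre_ excludes n ≤ 0 (n = 0 raises ValueError/ZeroDivisionError; negative n is outside the task's
-- natural domain — A silently drops every integer digit there, an artefact of range() with a negative
-- step) and stripped inputs containing two or more dots, on which A raises ValueError when unpacking split().
def Pre_add_comma_every_n_symbols (input_value : String) (n : Int) : Prop :=
  1 ≤ n ∧ (PySem.Chars.strip input_value.toList).count '.' ≤ 1
instance (input_value : String) (n : Int) : Decidable (Pre_add_comma_every_n_symbols input_value n) := by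
  unfold Pre_add_comma_every_n_symbols; infer_instance

def pvWitness_add_comma_every_n_symbols : String × Int := ("-1234567.89", 3)

def Spec_add_comma_every_n_symbols (input_value : String) (n : Int) (out : String) : Prop :=
  out = add_comma_every_n_symbols_alt input_value n
instance (input_value : String) (n : Int) (out : String) : Decidable (Spec_add_comma_every_n_symbols input_value n out) := by
  unfold Spec_add_comma_every_n_symbols; infer_instance

-- ===== CLAIM (what is proved, stated in full; the proofs are below) =====
def Claim_equal_add_comma_every_n_symbols : Prop := ∀ (input_value : String) (n : Int), Dom_add_comma_every_n_symbols input_value n → Pre_add_comma_every_n_symbols input_value n → Spec_add_comma_every_n_symbols input_value n (add_comma_every_n_symbols input_value n)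

-- ===== LEMMAS AND PROOFS =====

-- ceiling division, the length of Python's range(0, m, k)
def pvCeilDiv (m k : Nat) : Nat := (m + k - 1) / k

-- forward chunking into groups of (k+1) — the shape A's comprehension reduces to
def pvChunk (k : Nat) : List Char → List (List Char)
  | [] => []
  | x :: xs => ((x :: xs).take (k + 1)) :: pvChunk k (xs.drop k)
termination_by l => l.length
decreasing_by simp [List.length_drop]

-- B's single pass, abstractly: emit l[j], with a comma in front when (len - j) % k = 0, j ≠ 0
def pvEmit (k : Nat) (l : List Char) : List Char :=
  (List.range l.length).flatMap
    (fun j => (if j ≠ 0 ∧ (l.length - j) % k = 0 then [','] else []) ++ [l.getD j ' '])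

theorem pvChunk_cons (k : Nat) (hk : 1 ≤ k) (r : List Char) (hr : r ≠ []) :
    pvChunk (k - 1) r = r.take k :: pvChunk (k - 1) (r.drop k) := by
  obtain ⟨k', rfl⟩ : ∃ k', k = k' + 1 := ⟨k - 1, (Nat.sub_add_cancel hk).symm⟩
  cases r with
  | nil => exact absurd rfl hr
  | cons x xs => simp [pvChunk]

theorem pvChunk_ne_nil (k : Nat) (r : List Char) (hr : r ≠ []) : pvChunk k r ≠ [] := by
  cases r with
  | nil => exact absurd rfl hr
  | cons x xs => simp [pvChunk]

theorem pvCeilDiv_succ (m k : Nat) (hk : 1 ≤ k) (hm : 1 ≤ m) :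
    pvCeilDiv m k = pvCeilDiv (m - k) k + 1 := by
  obtain ⟨m', rfl⟩ : ∃ m', m = m' + 1 := ⟨m - 1, (Nat.sub_add_cancel hm).symm⟩
  unfold pvCeilDiv
  have h1 : m' + 1 + k - 1 = m' + k := by omega
  rw [h1, Nat.add_div_right _ (by omega)]
  rcases Nat.lt_or_ge m' k with h | h
  · have h2 : m' + 1 - k + k - 1 < k := by omega
    rw [Nat.div_eq_of_lt h2, Nat.div_eq_of_lt h]
  · have h2 : m' + 1 - k + k - 1 = m' := by omega
    rw [h2]

theorem pvRangeChunk (k : Nat) (hk : 1 ≤ k) :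
    ∀ (r : List Char),
      (List.range (pvCeilDiv r.length k)).map (fun j => (r.drop (k * j)).take k) = pvChunk (k - 1) r := by
  suffices H : ∀ N (r : List Char), r.length ≤ N →
      (List.range (pvCeilDiv r.length k)).map (fun j => (r.drop (k * j)).take k) = pvChunk (k - 1) r from
    fun r => H r.length r le_rfl
  intro N
  induction N with
  | zero =>
    intro r hr
    have : r = [] := List.eq_nil_of_length_eq_zero (by omega)
    subst this
    simp [pvCeilDiv, pvChunk, Nat.div_eq_of_lt (by omega : 0 + k - 1 < k)]
    omega
  | succ N ih =>
    intro r hr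
    rcases List.eq_nil_or_concat' r with rfl | h
    · simp [pvCeilDiv, pvChunk, Nat.div_eq_of_lt (by omega : 0 + k - 1 < k)]
      omega
    · have hm : 1 ≤ r.length := by
        obtain ⟨x, xs, rfl⟩ : ∃ x xs, r = x :: xs := by
          cases r with
          | nil => obtain ⟨_, _, h⟩ := h; simp at h
          | cons a l => exact ⟨a, l, rfl⟩
        simp
      rw [pvCeilDiv_succ _ _ hk hm, List.range_succ_eq_map, List.map_cons, List.map_map]
      rw [pvChunk_cons k hk r (by intro h0; rw [h0] at hm; simp at hm)]
      have htail : (List.range (pvCeilDiv (r.length - k) k)).map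
          ((fun j => (r.drop (k * j)).take k) ∘ Nat.succ) = pvChunk (k - 1) (r.drop k) := by
        have hlen : (r.drop k).length = r.length - k := by simp
        have hih := ih (r.drop k) (by simp; omega)
        rw [hlen] at hih
        rw [← hih]
        apply List.map_congr_left
        intro j _
        simp only [Function.comp_apply, Nat.succ_eq_add_one, Nat.mul_succ, List.drop_drop]
        congr 2
        omega
      rw [htail]
      congr 1

theorem pvJoin_cons (x : List Char) (ys : List (List Char)) (hys : ys ≠ []) :
    PySem.Chars.join [','] (x :: ys) = x ++ ',' :: PySem.Chars.join [','] ys := by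
  cases ys with
  | nil => exact absurd rfl hys
  | cons y ys' => rw [PySem.Chars.join_cons_cons]; simp

-- l reconstructed from its positions
theorem pvMapGetD (l : List Char) : (List.range l.length).map (fun j => l.getD j ' ') = l := by
  apply List.ext_getElem
  · simp
  · intro i h1 h2
    simp [List.getD_eq_getElem?_getD, List.getElem?_eq_getElem h2]

-- pvEmit on a short nonempty list is the list itself (no commas fire)
theorem pvEmit_small (k : Nat) (hk : 1 ≤ k) (l : List Char) (hl : l ≠ []) (hlen : l.length ≤ k) :
    pvEmit k l = l := by
  unfold pvEmit
  have h1 : ∀ j ∈ List.range l.length,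
      (if j ≠ 0 ∧ (l.length - j) % k = 0 then [','] else []) ++ [l.getD j ' '] = [l.getD j ' '] := by
    intro j hj
    rw [List.mem_range] at hj
    rw [if_neg, List.nil_append]
    rintro ⟨hj0, hmod⟩
    have h2 : 0 < l.length - j ∧ l.length - j < k := by
      constructor
      · omega
      · rcases Nat.lt_or_ge l.length k with h | h
        · omega
        · have : l.length = k := le_antisymm hlen h
          omega
    rw [Nat.mod_eq_of_lt h2.2] at hmod
    omega
  calc (List.range l.length).flatMap
        (fun j => (if j ≠ 0 ∧ (l.length - j) % k = 0 then [','] else []) ++ [l.getD j ' '])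
      = (List.range l.length).flatMap (fun j => [l.getD j ' ']) := by
        rw [List.flatMap_def, List.flatMap_def, List.map_congr_left h1]
    _ = (List.range l.length).map (fun j => l.getD j ' ') := by
        rw [← List.map_eq_flatMap]
    _ = l := pvMapGetD l

-- peeling the last k characters off pvEmit
theorem pvEmit_append (k : Nat) (hk : 1 ≤ k) (a b : List Char) (ha : a ≠ []) (hb : b.length = k) :
    pvEmit k (a ++ b) = pvEmit k a ++ ',' :: b := by
  have hm : 1 ≤ a.length := by
    cases a with | nil => exact absurd rfl ha | cons x xs => simp
  unfold pvEmit
  have hlen : (a ++ b).length = a.length + k := by simp [hb]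
  rw [hlen, List.range_add, List.flatMap_append, List.flatMap_map]
  congr 1
  · rw [List.flatMap_def, List.flatMap_def]
    congr 1
    apply List.map_congr_left
    intro j hj
    rw [List.mem_range] at hj
    have hgd : (a ++ b).getD j ' ' = a.getD j ' ' := by
      simp [List.getD_eq_getElem?_getD, List.getElem?_append_left hj]
    have hmod : (a.length + k - j) % k = (a.length - j) % k := by
      have h : a.length + k - j = (a.length - j) + k := by omega
      rw [h, Nat.add_mod_right]
    rw [hgd, hmod]
  · have hbody : ∀ i ∈ List.range k,
        (if a.length + i ≠ 0 ∧ (a.length + k - (a.length + i)) % k = 0 then [','] else [])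
          ++ [(a ++ b).getD (a.length + i) ' ']
        = (if i = 0 then [','] else []) ++ [b.getD i ' '] := by
      intro i hi
      rw [List.mem_range] at hi
      have hgd : (a ++ b).getD (a.length + i) ' ' = b.getD i ' ' := by
        simp only [List.getD_eq_getElem?_getD, List.getElem?_append_right (by omega : a.length ≤ a.length + i)]
        congr 2
        omega
      rw [hgd]
      by_cases hi0 : i = 0
      · subst hi0
        rw [if_pos ⟨by omega, by simp⟩, if_pos rfl]
      · rw [if_neg, if_neg hi0]
        rintro ⟨_, hmod⟩
        rw [show a.length + k - (a.length + i) = k - i by omega, Nat.mod_eq_of_lt (by omega)] at hmod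
        omega
    rw [List.flatMap_congr hbody]
    obtain ⟨k', rfl⟩ : ∃ k', k = k' + 1 := ⟨k - 1, (Nat.sub_add_cancel hk).symm⟩
    rw [List.range_succ_eq_map, List.flatMap_cons, List.flatMap_map]
    have h1 : ∀ i ∈ List.range k',
        (if Nat.succ i = 0 then [','] else []) ++ [b.getD (Nat.succ i) ' '] = [b.getD (i + 1) ' '] := by
      intro i _
      rw [if_neg (by omega), List.nil_append]
    rw [List.flatMap_congr h1]
    rw [← List.map_eq_flatMap]
    have hb' : b = b.getD 0 ' ' :: (List.range k').map (fun i => b.getD (i + 1) ' ') := by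
      conv_lhs => rw [← pvMapGetD b]
      rw [hb, List.range_succ_eq_map, List.map_cons, List.map_map]
      rfl
    conv_rhs => rw [hb']
    simp

-- the key identity: B's single pass equals A's reversed join of reversed chunks
theorem pvEmitRev (k : Nat) (hk : 1 ≤ k) :
    ∀ (l : List Char),
      pvEmit k l = (PySem.Chars.join [','] (pvChunk (k - 1) l.reverse)).reverse := by
  suffices H : ∀ N (l : List Char), l.length ≤ N →
      pvEmit k l = (PySem.Chars.join [','] (pvChunk (k - 1) l.reverse)).reverse from
    fun l => H l.length l le_rfl
  intro N
  induction N with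
  | zero =>
    intro l hl
    have : l = [] := List.eq_nil_of_length_eq_zero (by omega)
    subst this
    simp [pvEmit, pvChunk, PySem.Chars.join_nil]
  | succ N ih =>
    intro l hl
    by_cases hnil : l = []
    · subst hnil; simp [pvEmit, pvChunk, PySem.Chars.join_nil]
    have hm : 1 ≤ l.length := by
      cases l with | nil => exact absurd rfl hnil | cons a l' => simp
    by_cases hmk : l.length ≤ k
    · have h1 : pvChunk (k - 1) l.reverse = [l.reverse] := by
        rw [pvChunk_cons k hk l.reverse (by simp [hnil])]
        rw [List.take_of_length_le (by simp [hmk]), List.drop_eq_nil_of_le (by simp [hmk])]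
        simp [pvChunk]
      rw [h1, PySem.Chars.join_singleton, List.reverse_reverse]
      exact pvEmit_small k hk l hnil hmk
    · push_neg at hmk
      obtain ⟨a, b, hab, hal, hbl⟩ :
          ∃ a b, l = a ++ b ∧ a.length = l.length - k ∧ b.length = k :=
        ⟨l.take (l.length - k), l.drop (l.length - k), (List.take_append_drop _ _).symm,
          by rw [List.length_take]; omega, by rw [List.length_drop]; omega⟩
      have hane : a ≠ [] := by
        intro h0; rw [h0] at hal; simp at hal; omega
      have hchunk : pvChunk (k - 1) l.reverse = b.reverse :: pvChunk (k - 1) a.reverse := by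
        rw [hab, List.reverse_append]
        rw [pvChunk_cons k hk _ (by
          intro h0
          apply hane
          have h2 := (List.append_eq_nil_iff.mp h0).2
          simpa using h2)]
        rw [List.take_left' (by simp [hbl]), List.drop_left' (by simp [hbl])]
      rw [hchunk, pvJoin_cons _ _ (pvChunk_ne_nil _ _ (by simp [hane]))]
      rw [hab, pvEmit_append k hk a b hane hbl, ih a (by omega)]
      simp

-- 'out += …' accumulation over a loop is init ++ flatMap
theorem pvFoldEmit (e' : Int) (nn : Int) (s : List Char) :
    ∀ (l : List Nat) (init : List Char),
      l.foldl (fun (out : List Char) (j : Nat) =>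
          (if j ≠ 0 ∧ PySem.Int.mod (e' - (j : Int)) nn = 0 then out ++ [','] else out) ++ [s.getD j ' '])
        init
      = init ++ l.flatMap
          (fun (j : Nat) => (if j ≠ 0 ∧ PySem.Int.mod (e' - (j : Int)) nn = 0 then [','] else []) ++ [s.getD j ' ']) := by
  intro l
  induction l with
  | nil => intro init; simp
  | cons x t ih =>
    intro init
    rw [List.foldl_cons, ih, List.flatMap_cons]
    split_ifs with h <;> simp

-- B's loop body over range(end) is pvEmit on the integer part
theorem pvEmitBridge (k : Nat) (hk : 1 ≤ k) (s : List Char) (e : Nat) (he : e ≤ s.length) :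
    (List.range e).flatMap
        (fun (j : Nat) => (if j ≠ 0 ∧ PySem.Int.mod ((e : Int) - (j : Int)) ((k : Nat) : Int) = 0 then [','] else [])
          ++ [s.getD j ' '])
      = pvEmit k (s.take e) := by
  unfold pvEmit
  have hlen : (s.take e).length = e := by simp [he]
  rw [hlen, List.flatMap_def, List.flatMap_def]
  congr 1
  apply List.map_congr_left
  intro j hj
  rw [List.mem_range] at hj
  have h1 : (e : Int) - (j : Int) = ((e - j : Nat) : Int) := by push_cast; omega
  have h2 : PySem.Int.mod ((e : Int) - (j : Int)) ((k : Nat) : Int) = (((e - j) % k : Nat) : Int) := by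
    rw [h1, PySem.Int.mod_natCast]
  have h3 : (s.take e).getD j ' ' = s.getD j ' ' := by
    simp [List.getD_eq_getElem?_getD, hj]
  rw [h2, h3]
  simp only [Nat.cast_eq_zero]

-- A's comprehension over range(0, len, n) is forward chunking of the reversed digits
theorem pvAReify (k : Nat) (hk : 1 ≤ k) (r : List Char) :
    (PySem.List.pyRange 0 (r.length : Int) (k : Int)).map
        (fun i => PySem.List.slice r (some i) (some (i + (k : Int))))
      = pvChunk (k - 1) r := by
  have hk' : (0:Int) < (k:Int) := by exact_mod_cast hk
  rw [PySem.List.pyRange_of_pos _ _ hk']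
  have hcnt : (if (0:Int) < (r.length:Int) then (((r.length:Int) - 0 + (k:Int) - 1)/(k:Int)).toNat else 0)
      = pvCeilDiv r.length k := by
    split_ifs with h
    · have h1 : ((r.length:Int) - 0 + (k:Int) - 1) = ((r.length + k - 1 : Nat) : Int) := by push_cast; omega
      rw [h1, ← Int.natCast_div, Int.toNat_natCast]
      rfl
    · have h0 : r.length = 0 := by exact_mod_cast by omega
      rw [h0]
      simp only [pvCeilDiv, Nat.zero_add]
      rw [Nat.div_eq_of_lt (by omega : k - 1 < k)]
  rw [hcnt, List.map_map, ← pvRangeChunk k hk r]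
  apply List.map_congr_left
  intro j _
  simp only [Function.comp_apply]
  have h2 : (0:Int) + (k:Int) * (j:Int) = ((k*j : Nat) : Int) := by push_cast; ring
  rw [h2, PySem.List.slice_natCast_add]

-- splitOn.go on a dot-free piece
theorem pvSplitGo_noDot :
    ∀ (u : List Char) (fuel : Nat) (cur : List Char) (acc : List (List Char)),
      '.' ∉ u → u.length ≤ fuel →
      PySem.Chars.splitOn.go ['.'] fuel u cur acc = ((cur.reverse ++ u) :: acc).reverse := by
  intro u
  induction u with
  | nil =>
    intro fuel cur acc _ _
    cases fuel <;> rw [PySem.Chars.splitOn.go.eq_def] <;> simp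
  | cons c u ih =>
    intro fuel cur acc hu hf
    simp only [List.mem_cons, not_or] at hu
    obtain ⟨fuel, rfl⟩ : ∃ f, fuel = f + 1 := ⟨fuel - 1, by simp at hf; omega⟩
    rw [PySem.Chars.splitOn.go.eq_def]
    have hc : ('.' == c) = false := by simpa using hu.1
    simp only [List.isPrefixOf, hc, Bool.false_and, if_false]
    rw [ih fuel (c :: cur) acc hu.2 (by simp at hf ⊢; omega)]
    simp

-- splitOn.go on u ++ '.' :: v with dot-free u, v
theorem pvSplitGo_oneDot :
    ∀ (u : List Char) (v : List Char) (fuel : Nat) (cur : List Char) (acc : List (List Char)),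
      '.' ∉ u → '.' ∉ v → u.length + v.length + 1 ≤ fuel →
      PySem.Chars.splitOn.go ['.'] fuel (u ++ '.' :: v) cur acc
        = (v :: (cur.reverse ++ u) :: acc).reverse := by
  intro u
  induction u with
  | nil =>
    intro v fuel cur acc _ hv hf
    obtain ⟨fuel, rfl⟩ : ∃ f, fuel = f + 1 := ⟨fuel - 1, by omega⟩
    rw [List.nil_append, PySem.Chars.splitOn.go.eq_def]
    simp only [List.isPrefixOf, BEq.rfl, Bool.true_and, List.isPrefixOf_nil_left, if_true]
    rw [show List.drop (List.length ['.']) ('.' :: v) = v by simp]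
    rw [pvSplitGo_noDot v fuel [] (cur.reverse :: acc) hv (by simp at hf; omega)]
    simp
  | cons c u ih =>
    intro v fuel cur acc hu hv hf
    simp only [List.mem_cons, not_or] at hu
    obtain ⟨fuel, rfl⟩ : ∃ f, fuel = f + 1 := ⟨fuel - 1, by omega⟩
    rw [List.cons_append, PySem.Chars.splitOn.go.eq_def]
    have hc : ('.' == c) = false := by simpa using hu.1
    simp only [List.isPrefixOf, hc, Bool.false_and, if_false]
    rw [ih v fuel (c :: cur) acc hu.2 hv (by simp at hf ⊢; omega)]
    simp

theorem pvFindGo_noDot : ∀ (u : List Char) (j : Nat), '.' ∉ u →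
    PySem.Chars.find.go ['.'] u j = -1 := by
  intro u
  induction u with
  | nil => intro j _; rw [PySem.Chars.find.go.eq_def]; simp
  | cons c u ih =>
    intro j hu
    rw [PySem.Chars.find.go.eq_def]
    simp only [List.mem_cons, not_or] at hu
    have hc : ('.' == c) = false := by simpa using hu.1
    simp only [List.isPrefixOf, hc, Bool.false_and, if_false]
    exact ih (j + 1) hu.2

theorem pvFindGo_oneDot : ∀ (u : List Char) (v : List Char) (j : Nat), '.' ∉ u →
    PySem.Chars.find.go ['.'] (u ++ '.' :: v) j = ((j : Int) + (u.length : Int)) := by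
  intro u
  induction u with
  | nil =>
    intro v j _
    rw [List.nil_append, PySem.Chars.find.go.eq_def]
    simp [List.isPrefixOf]
  | cons c u ih =>
    intro v j hu
    simp only [List.mem_cons, not_or] at hu
    have hc : ('.' == c) = false := by simpa using hu.1
    rw [List.cons_append, PySem.Chars.find.go.eq_def]
    simp only [List.isPrefixOf, hc, Bool.false_and, if_false]
    rw [ih v (j + 1) hu.2]
    simp only [List.length_cons]; push_cast; ring

-- first-dot decomposition from count ≤ 1
theorem pvDecomp (t : List Char) (h1 : '.' ∈ t) (h2 : t.count '.' ≤ 1) :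
    ∃ u v, t = u ++ '.' :: v ∧ '.' ∉ u ∧ '.' ∉ v := by
  induction t with
  | nil => cases h1
  | cons c t ih =>
    by_cases hc : c = '.'
    · subst hc
      refine ⟨[], t, rfl, by simp, ?_⟩
      rw [List.count_cons_self] at h2
      exact List.count_eq_zero.mp (by omega)
    · have h1' : '.' ∈ t := by
        rcases List.mem_cons.mp h1 with h | h
        · exact absurd h.symm hc
        · exact h
      have h2' : t.count '.' ≤ 1 := by
        simp only [List.count_cons, hc, if_false, beq_iff_eq] at h2
        omega
      obtain ⟨u, v, rfl, hu, hv⟩ := ih h1' h2'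
      exact ⟨c :: u, v, rfl, by
        simp only [List.mem_cons, not_or]; exact ⟨fun h => hc h.symm, hu⟩, hv⟩

-- A's reversed join over l equals B's pass over l ++ rest cut at l.length, for dot-free l prefixes
theorem pvMid (k : Nat) (hk : 1 ≤ k) (sign l rest : List Char) :
    sign ++ pvEmit k ((l ++ rest).take l.length) ++ PySem.List.slice (l ++ rest) (some (l.length : Int)) none
      = (sign ++ (PySem.Chars.join [','] ((PySem.List.pyRange 0 (l.reverse.length : Int) (k : Int)).map
          (fun i => PySem.List.slice l.reverse (some i) (some (i + (k : Int)))))).reverse) ++ rest := by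
  rw [pvAReify k hk l.reverse, ← pvEmitRev k hk l]
  rw [List.take_left' rfl, PySem.List.slice_from_natCast, List.drop_left' rfl]

-- the two loop shapes agree once B's string is split as integer digits ++ remainder
theorem pvCore (k : Nat) (hk : 1 ≤ k) (sign l rest : List Char) :
    (List.range l.length).foldl
        (fun (out : List Char) (j : Nat) =>
          (if j ≠ 0 ∧ PySem.Int.mod ((l.length : Int) - (j : Int)) ((k : Nat) : Int) = 0 then out ++ [','] else out)
            ++ [(l ++ rest).getD j ' ']) sign
      ++ PySem.List.slice (l ++ rest) (some (l.length : Int)) none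
    = (sign ++ (PySem.Chars.join [','] ((PySem.List.pyRange 0 (l.reverse.length : Int) (k : Int)).map
        (fun i => PySem.List.slice l.reverse (some i) (some (i + (k : Int)))))).reverse) ++ rest := by
  rw [pvFoldEmit ((l.length : Int)) ((k : Nat) : Int) (l ++ rest) (List.range l.length) sign]
  rw [pvEmitBridge k hk (l ++ rest) l.length (by simp)]
  exact pvMid k hk sign l rest

-- ===== VERDICT (by name: the statement is the Claim_ definition above) =====
theorem add_comma_every_n_symbols_spec : Claim_equal_add_comma_every_n_symbols := by
  unfold Claim_equal_add_comma_every_n_symbols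
  intro input n hdom hpre
  unfold Pre_add_comma_every_n_symbols at hpre
  obtain ⟨hn, hcnt⟩ := hpre
  unfold Spec_add_comma_every_n_symbols
  have hnk : n = ((n.toNat : Nat) : Int) := by omega
  have hk : 1 ≤ n.toNat := by omega
  rw [hnk]
  unfold add_comma_every_n_symbols add_comma_every_n_symbols_alt
  by_cases hd : '.' ∈ PySem.Chars.strip input.toList
  · obtain ⟨u, v, htuv, hu, hv⟩ := pvDecomp _ hd hcnt
    rw [htuv]
    have hisin : PySem.Chars.isIn ['.'] (u ++ '.' :: v) = true := by
      unfold PySem.Chars.isIn PySem.Chars.find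
      rw [show PySem.Chars.find.go ['.'] (u ++ '.' :: v) 0 = ((0 : Int) + (u.length : Int)) from
        pvFindGo_oneDot u v 0 hu]
      simp only [bne_iff_ne, ne_eq]
      omega
    have hsplit : PySem.Chars.splitOn (u ++ '.' :: v) ['.'] = [u, v] := by
      unfold PySem.Chars.splitOn
      rw [pvSplitGo_oneDot u v _ [] [] hu hv (by simp)]
      simp
    try dsimp only
    rw [hisin, hsplit]
    simp only [reduceIte]
    try dsimp only
    cases u with
    | nil =>
      -- stripped value begins with the dot: no sign, empty integer part
      exact (congrArg String.ofList (pvCore n.toNat hk [] [] ('.' :: v))).symm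
    | cons c u' =>
      simp only [List.cons_append]
      try dsimp only
      by_cases hc : c = '-' ∨ c = '+'
      · -- sign present: both ports strip it; B then finds the dot in u' ++ '.' :: v
        have hu' : '.' ∉ u' := fun h => hu (List.mem_cons_of_mem c h)
        have hfind : PySem.Chars.find (u' ++ '.' :: v) ['.'] = ((u'.length : Nat) : Int) := by
          unfold PySem.Chars.find
          have h := pvFindGo_oneDot u' v 0 hu'
          simpa using h
        simp only [if_pos hc, if_pos (show c ∈ ['+', '-'] by rcases hc with h | h <;> simp [h])]
        try dsimp only
        rw [hfind, if_neg (by omega : ¬ ((u'.length : Nat) : Int) = -1), Int.toNat_natCast]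
        exact (congrArg String.ofList (pvCore n.toNat hk [c] u' ('.' :: v))).symm
      · -- no sign: B finds the dot in the whole stripped string
        have hfind : PySem.Chars.find (c :: (u' ++ '.' :: v)) ['.'] = ((u'.length : Int) + 1) := by
          unfold PySem.Chars.find
          have h := pvFindGo_oneDot (c :: u') v 0 hu
          simp only [List.cons_append] at h
          rw [h]
          simp only [List.length_cons]
          push_cast
          ring
        simp only [if_neg hc, if_neg (show ¬ c ∈ ['+', '-'] by
          intro hm
          simp only [List.mem_cons, List.not_mem_nil, or_false] at hm
          rcases hm with h | h
          · exact hc (Or.inr h)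
          · exact hc (Or.inl h))]
        try dsimp only
        rw [hfind, if_neg (by omega : ¬ ((u'.length : Int) + 1) = -1)]
        rw [show ((u'.length : Int) + 1).toNat = (c :: u').length from by
          simp only [List.length_cons]; omega]
        exact (congrArg String.ofList (pvCore n.toNat hk [] (c :: u') ('.' :: v))).symm
  · -- no dot: the whole stripped (sign-less) string is the integer part
    have hisin : PySem.Chars.isIn ['.'] (PySem.Chars.strip input.toList) = false := by
      unfold PySem.Chars.isIn PySem.Chars.find
      rw [pvFindGo_noDot _ 0 hd]
      simp
    try dsimp only
    rw [hisin]
    simp only [Bool.false_eq_true, reduceIte]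
    cases hcase : PySem.Chars.strip input.toList with
    | nil =>
      have h := pvCore n.toNat hk [] [] []
      simp only [List.append_nil] at h
      exact (congrArg String.ofList h).symm
    | cons c u' =>
      have hd' : '.' ∉ c :: u' := by rw [← hcase]; exact hd
      try dsimp only
      by_cases hc : c = '-' ∨ c = '+'
      · have hu' : '.' ∉ u' := fun h => hd' (List.mem_cons_of_mem c h)
        simp only [if_pos hc, if_pos (show c ∈ ['+', '-'] by rcases hc with h | h <;> simp [h])]
        try dsimp only
        rw [show PySem.Chars.find u' ['.'] = -1 from by
          unfold PySem.Chars.find; exact pvFindGo_noDot _ 0 hu']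
        rw [if_pos rfl, Int.toNat_natCast]
        have h := pvCore n.toNat hk [c] u' []
        simp only [List.append_nil] at h
        exact (congrArg String.ofList h).symm
      · simp only [if_neg hc, if_neg (show ¬ c ∈ ['+', '-'] by
          intro hm
          simp only [List.mem_cons, List.not_mem_nil, or_false] at hm
          rcases hm with h | h
          · exact hc (Or.inr h)
          · exact hc (Or.inl h))]
        try dsimp only
        rw [show PySem.Chars.find (c :: u') ['.'] = -1 from by
          unfold PySem.Chars.find; exact pvFindGo_noDot _ 0 hd']
        rw [if_pos rfl, Int.toNat_natCast]
        have h := pvCore n.toNat hk [] (c :: u') []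
        simp only [List.append_nil] at h
        exact (congrArg String.ofList h).symm
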